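-- pv_equiv track=rewrite | github.com/Aroize/FancyRec | src/ncf/.ipynb_checkpoints/dataset-checkpoint.py | get_mappers
-- ===== SOURCE A (Python) =====
-- def get_mappers(data):
--     user_to_idx = {}
--     item_to_idx = {}
--     for u,i in data:
--         if u not in user_to_idx:
--             idx = len(user_to_idx)
--             user_to_idx[u] = idx
--         if i not in item_to_idx:
--             idx = len(item_to_idx)
--             item_to_idx[i] = idx
--     return (user_to_idx, item_to_idx)
-- ===== SOURCE B (Python) =====
-- def get_mappers(data):
--     rows = list(data)
--     def mapper(col):
--         keys = sorted(set(col), key=col.index)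
--         return {k: n for n, k in enumerate(keys)}
--     return (mapper([u for u, _ in rows]), mapper([i for _, i in rows]))
-- ===== Notes on version B (the rewrite author's own statement) =====
-- stated objective: alternative
-- what changed: Replaced the single interleaved membership-check loop that grows both dicts simultaneously with a sort-based algorithm per column: take the distinct keys as a set, sort them by position of first occurrence (key=col.index), then enumerate; it trades the hash-map pass for a comparison sort over repeated linear index scans.
import Mathlib
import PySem

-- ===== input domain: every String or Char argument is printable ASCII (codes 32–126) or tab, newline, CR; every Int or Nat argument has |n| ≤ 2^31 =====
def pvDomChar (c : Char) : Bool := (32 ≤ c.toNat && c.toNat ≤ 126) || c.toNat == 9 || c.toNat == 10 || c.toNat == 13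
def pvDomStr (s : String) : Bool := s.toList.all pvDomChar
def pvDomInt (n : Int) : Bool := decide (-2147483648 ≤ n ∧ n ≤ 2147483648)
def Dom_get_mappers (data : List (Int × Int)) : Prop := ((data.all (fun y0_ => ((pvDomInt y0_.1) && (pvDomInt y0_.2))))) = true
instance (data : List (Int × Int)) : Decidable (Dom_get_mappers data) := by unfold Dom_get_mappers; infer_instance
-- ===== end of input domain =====

-- B replaces A's interleaved hash-map pass by a per-column sort of the distinct keys by first-occurrence position; same return value.

-- ===== PORT A =====
-- one loop step of A's for-loop: conditionally extend each dict with the next (u, i) row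
def pvStepA (st : PySem.Dict Int Int × PySem.Dict Int Int) (ui : Int × Int) :
    PySem.Dict Int Int × PySem.Dict Int Int :=
  let ud := if st.1.contains ui.1 then st.1 else st.1.insert ui.1 (PySem.Dict.size st.1)
  let id := if st.2.contains ui.2 then st.2 else st.2.insert ui.2 (PySem.Dict.size st.2)
  (ud, id)

def get_mappers (data : List (Int × Int)) : (List (Int × Int)) × (List (Int × Int)) :=
  let p := data.foldl pvStepA (PySem.Dict.empty, PySem.Dict.empty)
  (p.1.items, p.2.items)

-- ===== PORT B =====
-- mapper(col) of Source B: sorted(set(col), key=col.index) — exact here since col.index is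
-- injective on set(col) — then the dict comprehension {k: n for n, k in enumerate(keys)}:
-- keys has no duplicates, so the dict's items are exactly these pairs in order (exact here)
def pvMapper (col : List Int) : List (Int × Int) :=
  let keys := PySem.List.sorted (PySem.Set.ofList col)
      (fun k => (PySem.List.index? col k).getD 0)
  (PySem.List.enumerate keys).map (fun p => (p.2, p.1))

def get_mappers_alt (data : List (Int × Int)) : (List (Int × Int)) × (List (Int × Int)) :=
  let rows := data
  (pvMapper (rows.map (·.1)), pvMapper (rows.map (·.2)))

-- ===== PRECONDITION & SPEC =====
def Spec_get_mappers (data : List (Int × Int)) (out : (List (Int × Int)) × (List (Int × Int))) : Prop := out = get_mappers_alt data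
instance (data : List (Int × Int)) (out : (List (Int × Int)) × (List (Int × Int))) : Decidable (Spec_get_mappers data out) := by unfold Spec_get_mappers; infer_instance

-- ===== CLAIM (what is proved, stated in full; the proofs are below) =====
def Claim_equal_get_mappers : Prop := ∀ (data : List (Int × Int)), Dom_get_mappers data → Spec_get_mappers data (get_mappers data)

-- ===== LEMMAS AND PROOFS =====

-- the pairs (key, position) that both sides ultimately produce for a distinct-key list ks
def pvIdxMap (ks : List Int) : List (Int × Int) :=
  (PySem.List.enumerate ks).map (fun p => (p.2, p.1))

-- the dict A has built after seeing exactly the distinct keys `ks` (in order)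
def pvMk (ks : List Int) : PySem.Dict Int Int := PySem.Dict.mk (pvIdxMap ks)

theorem pvMk_keys (ks : List Int) : (pvMk ks).keys = ks := by
  simp [pvMk, pvIdxMap, PySem.Dict.keys, List.map_map, Function.comp_def, PySem.List.map_snd_enumerate]

theorem pvMk_contains (ks : List Int) (k : Int) : (pvMk ks).contains k = decide (k ∈ ks) := by
  rw [PySem.Dict.contains_eq_decide_mem_keys, pvMk_keys]

theorem pvStep_mk (ks : List Int) (k : Int) :
    (if (pvMk ks).contains k then pvMk ks else (pvMk ks).insert k (PySem.Dict.size (pvMk ks)))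
      = pvMk (PySem.Set.add ks k) := by
  rw [pvMk_contains, PySem.Set.add_eq_ite]
  by_cases h : k ∈ ks
  · simp [h]
  · simp only [h, decide_false, if_neg, Bool.false_eq_true, not_false_eq_true]
    apply PySem.Dict.ext
    rw [PySem.Dict.items_insert_of_not_contains _ _ (by rw [pvMk_contains]; simp [h])]
    simp [pvMk, pvIdxMap, PySem.Dict.size, PySem.List.length_enumerate,
      PySem.List.enumerate_append, PySem.List.enumerate_cons, PySem.List.enumerate_nil]

theorem pvFold_inv (data : List (Int × Int)) (us is : List Int) :
    data.foldl pvStepA (pvMk us, pvMk is)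
      = (pvMk (PySem.Set.update us (data.map (·.1))), pvMk (PySem.Set.update is (data.map (·.2)))) := by
  induction data generalizing us is with
  | nil => simp [PySem.Set.update_nil]
  | cons hd tl ih =>
      have hstep : pvStepA (pvMk us, pvMk is) hd
          = (pvMk (PySem.Set.add us hd.1), pvMk (PySem.Set.add is hd.2)) := by
        simp only [pvStepA, pvStep_mk]
      simp only [List.foldl_cons, hstep, ih, List.map_cons, PySem.Set.update_cons]

theorem pvMk_empty : (PySem.Dict.empty : PySem.Dict Int Int) = pvMk [] := by
  rfl

-- the distinct keys of col, in first-occurrence order, have strictly increasing col.index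
theorem pvPairwise_idx (col : List Int) :
    (PySem.Set.ofList col).Pairwise
      (fun a b => (PySem.List.index? col a).getD 0 < (PySem.List.index? col b).getD 0) := by
  induction col with
  | nil => simp [PySem.Set.ofList_nil]
  | cons x xs ih =>
      rw [PySem.Set.ofList_cons]
      have hmem : ∀ b ∈ (PySem.Set.ofList xs).discard x, b ≠ x ∧ b ∈ xs := by
        intro b hb
        have := (PySem.Set.mem_discard (PySem.Set.ofList xs) x b).mp hb
        exact ⟨this.2, (PySem.Set.mem_ofList xs b).mp this.1⟩
      have hidx : ∀ b, b ≠ x → b ∈ xs →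
          (PySem.List.index? (x :: xs) b).getD 0 = (PySem.List.index? xs b).getD 0 + 1 := by
        intro b hbx hbxs
        rw [PySem.List.index?_cons_of_ne xs (fun h => hbx h.symm)]
        obtain ⟨n, hn⟩ := Option.isSome_iff_exists.mp
          ((PySem.List.index?_isSome_iff xs b).mpr hbxs)
        rw [PySem.List.index?_eq_idxOf?] at hn
        simp [hn]
      refine List.Pairwise.cons ?_ ?_
      · intro b hb
        obtain ⟨hbx, hbxs⟩ := hmem b hb
        rw [PySem.List.index?_cons_self, hidx b hbx hbxs]
        simp
      · have hsub : ((PySem.Set.ofList xs).discard x).Sublist (PySem.Set.ofList xs) := by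
          simp [PySem.Set.discard]
        have hp := ih.sublist hsub
        refine hp.imp_of_mem ?_
        intro a b ha hb hab
        obtain ⟨hax, haxs⟩ := hmem a ha
        obtain ⟨hbx, hbxs⟩ := hmem b hb
        rw [hidx a hax haxs, hidx b hbx hbxs]
        omega

-- sorting set(col) by col.index gives exactly the first-occurrence dedup
theorem pvSorted_eq_ofList (col : List Int) :
    PySem.List.sorted (PySem.Set.ofList col) (fun k => (PySem.List.index? col k).getD 0)
      = PySem.Set.ofList col := by
  exact PySem.List.sorted_eq_of_perm_of_pairwise_lt _ _ _ (List.Perm.refl _) (pvPairwise_idx col)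

theorem pvMapper_eq (col : List Int) : pvMapper col = pvIdxMap (PySem.Set.ofList col) := by
  simp only [pvMapper, pvIdxMap, pvSorted_eq_ofList]

-- ===== VERDICT (by name: the statement is the Claim_ definition above) =====
theorem get_mappers_spec : Claim_equal_get_mappers := by
  intro data _
  show get_mappers data = get_mappers_alt data
  simp only [get_mappers, get_mappers_alt, pvMk_empty, pvFold_inv,
    PySem.Set.update_nil_left, pvMapper_eq]
  rfl
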